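-- pv_equiv track=rewrite | github.com/PotatoesBaked/JeuTaquin3-3 | taquin.py | generationEtatFinal
-- ===== SOURCE A (Python) =====
-- def generationEtatFinal(n, trou):
--    matrice = []
--    i = 0
--
--    for x in range(n):
--       sous_tab = []
--       for y in range(n):
--          if x == n-1 and y == n-1:
--             sous_tab.append(trou)
--          else:
--             sous_tab.append(i)
--             i += 1
--       matrice.append(sous_tab)
--    return matrice
-- ===== SOURCE B (Python) =====
-- def generationEtatFinal(n, trou):
--     if n <= 0:
--         return []
--     rows = [list(range(r * n, r * n + n)) for r in range(n - 1)]
--     rows.append(list(range((n - 1) * n, n * n - 1)) + [trou])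
--     return rows
-- ===== Notes on version B (the rewrite author's own statement) =====
-- stated objective: simpler
-- what changed: Replaces the nested element-by-element fill with its running counter and per-cell last-cell test by emitting each row as the closed-form consecutive range list(range(r*n, r*n+n)), with the last row built once as range((n-1)*n, n*n-1) plus the hole.
import Mathlib
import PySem

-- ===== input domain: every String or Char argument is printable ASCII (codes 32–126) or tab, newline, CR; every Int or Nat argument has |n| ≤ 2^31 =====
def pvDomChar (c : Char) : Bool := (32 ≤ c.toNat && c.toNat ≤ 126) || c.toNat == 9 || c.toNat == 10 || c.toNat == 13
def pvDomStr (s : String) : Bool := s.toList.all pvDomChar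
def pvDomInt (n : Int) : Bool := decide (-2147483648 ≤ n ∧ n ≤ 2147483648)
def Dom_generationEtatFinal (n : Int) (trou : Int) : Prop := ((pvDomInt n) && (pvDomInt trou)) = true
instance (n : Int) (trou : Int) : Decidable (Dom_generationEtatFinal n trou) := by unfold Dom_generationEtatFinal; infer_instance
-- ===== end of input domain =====

-- B builds each row directly as a closed-form consecutive range, instead of A's nested
-- per-cell fill with a running counter and per-cell last-cell test (objective: simpler).

-- ===== PORT A =====
-- state: (matrice so far, counter i); branches in A's order
def generationEtatFinal (n : Int) (trou : Int) : List (List Int) :=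
  let st :=
    (PySem.List.pyRange 0 n 1).foldl
      (fun (st : List (List Int) × Int) x =>
        let inner :=
          (PySem.List.pyRange 0 n 1).foldl
            (fun (st2 : List Int × Int) y =>
              if x = n - 1 ∧ y = n - 1 then (st2.1 ++ [trou], st2.2)
              else (st2.1 ++ [st2.2], st2.2 + 1))
            ([], st.2)
        (st.1 ++ [inner.1], inner.2))
      ([], 0)
  st.1

-- ===== PORT B =====
def generationEtatFinal_alt (n : Int) (trou : Int) : List (List Int) :=
  if n ≤ 0 then []
  else
    (PySem.List.pyRange 0 (n - 1) 1).map
        (fun r => PySem.List.pyRange (r * n) (r * n + n) 1)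
      ++ [PySem.List.pyRange ((n - 1) * n) (n * n - 1) 1 ++ [trou]]

-- ===== PRECONDITION & SPEC =====
def Spec_generationEtatFinal (n : Int) (trou : Int) (out : List (List Int)) : Prop := out = generationEtatFinal_alt n trou
instance (n : Int) (trou : Int) (out : List (List Int)) : Decidable (Spec_generationEtatFinal n trou out) := by unfold Spec_generationEtatFinal; infer_instance

-- ===== CLAIM (what is proved, stated in full; the proofs are below) =====
def Claim_equal_generationEtatFinal : Prop := ∀ (n : Int) (trou : Int), Dom_generationEtatFinal n trou → Spec_generationEtatFinal n trou (generationEtatFinal n trou)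

-- ===== LEMMAS AND PROOFS =====

-- the common row shape both programs produce for row r (0 ≤ r < n)
def pvRow (n trou r : Int) : List Int :=
  if r = n - 1 then PySem.List.pyRange (r * n) (r * n + n - 1) 1 ++ [trou]
  else PySem.List.pyRange (r * n) (r * n + n) 1

-- A's inner-loop and outer-loop step functions, named for rewriting
def pvIStep (n trou x : Int) (st2 : List Int × Int) (y : Int) : List Int × Int :=
  if x = n - 1 ∧ y = n - 1 then (st2.1 ++ [trou], st2.2)
  else (st2.1 ++ [st2.2], st2.2 + 1)

def pvStep (n trou : Int) (st : List (List Int) × Int) (x : Int) :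
    List (List Int) × Int :=
  let inner := (PySem.List.pyRange 0 n 1).foldl (pvIStep n trou x) ([], st.2)
  (st.1 ++ [inner.1], inner.2)

theorem pvA_eq (n trou : Int) :
    generationEtatFinal n trou
      = ((PySem.List.pyRange 0 n 1).foldl (pvStep n trou) ([], 0)).1 := rfl

-- inner loop of A when the hole branch never fires: appends a counter range
theorem pvInnerPlain (ys : List Int) :
    ∀ (acc : List Int) (i0 : Int),
      ys.foldl (fun (st2 : List Int × Int) _ => (st2.1 ++ [st2.2], st2.2 + 1)) (acc, i0)
        = (acc ++ PySem.List.pyRange i0 (i0 + ys.length) 1, i0 + ys.length) := by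
  induction ys with
  | nil => intro acc i0; simp [PySem.List.pyRange_one_eq_nil]
  | cons y ys ih =>
    intro acc i0
    simp only [List.foldl_cons, ih, List.length_cons]
    rw [Prod.mk.injEq]
    constructor
    · push_cast
      rw [PySem.List.pyRange_one_cons (a := i0) (b := i0 + ((ys.length : Int) + 1)) (by omega)]
      simp only [List.append_assoc, List.singleton_append]
      congr 3
      omega
    · push_cast; omega

-- inner loop of A for a non-last row x (x ≠ n-1)
theorem pvInnerRow (n trou x i0 : Int) (hn : 1 ≤ n) (hx : x ≠ n - 1) :
    (PySem.List.pyRange 0 n 1).foldl (pvIStep n trou x) ([], i0)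
      = (PySem.List.pyRange i0 (i0 + n) 1, i0 + n) := by
  have hcong := PySem.List.foldl_congr_mem (l := PySem.List.pyRange 0 n 1)
    (init := (([] : List Int), i0)) (f := pvIStep n trou x)
    (g := fun (st2 : List Int × Int) _ => (st2.1 ++ [st2.2], st2.2 + 1))
    (by intro st2 y _; simp [pvIStep, hx])
  rw [hcong, pvInnerPlain]
  rw [Prod.mk.injEq]
  simp [PySem.List.length_pyRange_one]
  constructor
  · congr 1; omega
  · omega

-- inner loop of A for the last row (x = n-1), n ≥ 1
theorem pvInnerLast (n trou i0 : Int) (hn : 1 ≤ n) :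
    (PySem.List.pyRange 0 n 1).foldl (pvIStep n trou (n - 1)) ([], i0)
      = (PySem.List.pyRange i0 (i0 + n - 1) 1 ++ [trou], i0 + n - 1) := by
  have hsplit : PySem.List.pyRange 0 n 1
      = PySem.List.pyRange 0 (n - 1) 1 ++ [n - 1] := by
    have := PySem.List.pyRange_one_succ_right (a := 0) (b := n - 1) (by omega)
    simpa using this
  rw [hsplit, List.foldl_append]
  have hcong := PySem.List.foldl_congr_mem (l := PySem.List.pyRange 0 (n - 1) 1)
    (init := (([] : List Int), i0)) (f := pvIStep n trou (n - 1))
    (g := fun (st2 : List Int × Int) _ => (st2.1 ++ [st2.2], st2.2 + 1))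
    (by
      intro st2 y hy
      have h2 : y < n - 1 := (PySem.List.mem_pyRange_one.mp hy).2
      have : ¬ (y = n - 1) := by omega
      simp [pvIStep, this])
  rw [hcong, pvInnerPlain]
  simp only [List.foldl_cons, List.foldl_nil, pvIStep, and_self, if_pos]
  rw [Prod.mk.injEq]
  simp [PySem.List.length_pyRange_one]
  constructor
  · congr 1; omega
  · omega

-- outer loop of A over the first r rows (all before the last): counter invariant i = r*n
theorem pvOuter (n trou : Int) (hn : 1 ≤ n) : ∀ (r : Nat), (r : Int) ≤ n - 1 →
    (PySem.List.pyRange 0 (r : Int) 1).foldl (pvStep n trou) ([], 0)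
      = ((PySem.List.pyRange 0 (r : Int) 1).map (pvRow n trou), (r : Int) * n) := by
  intro r
  induction r with
  | zero => intro _; simp [PySem.List.pyRange_one_eq_nil]
  | succ r ih =>
    intro hr
    have hr' : (r : Int) ≤ n - 1 := by push_cast at hr ⊢; omega
    have hsplit : PySem.List.pyRange 0 (((r : Nat) : Int) + 1) 1
        = PySem.List.pyRange 0 (r : Int) 1 ++ [(r : Int)] := by
      have := PySem.List.pyRange_one_succ_right (a := 0) (b := (r : Int)) (by omega)
      simpa using this
    push_cast
    rw [hsplit, List.foldl_append, List.map_append, ih hr']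
    simp only [List.foldl_cons, List.foldl_nil, List.map_cons, List.map_nil]
    have hx : (r : Int) ≠ n - 1 := by push_cast at hr; omega
    simp only [pvStep]
    rw [pvInnerRow n trou (r : Int) ((r : Int) * n) hn hx]
    rw [Prod.mk.injEq]
    constructor
    · congr 1
      simp [pvRow, hx]
    · ring

-- A computes the rows pvRow for 1 ≤ n
theorem pvA_rows (n trou : Int) (hn : 1 ≤ n) :
    generationEtatFinal n trou = (PySem.List.pyRange 0 n 1).map (pvRow n trou) := by
  rw [pvA_eq]
  have hsplit : PySem.List.pyRange 0 n 1
      = PySem.List.pyRange 0 (n - 1) 1 ++ [n - 1] := by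
    have := PySem.List.pyRange_one_succ_right (a := 0) (b := n - 1) (by omega)
    simpa using this
  obtain ⟨r, hr⟩ : ∃ r : Nat, (r : Int) = n - 1 := ⟨(n - 1).toNat, by omega⟩
  rw [hsplit, List.foldl_append, List.map_append]
  rw [← hr, pvOuter n trou hn r (by omega)]
  simp only [List.foldl_cons, List.foldl_nil, List.map_cons, List.map_nil]
  simp only [pvStep]
  rw [hr, pvInnerLast n trou ((n - 1) * n) hn]
  congr 1
  simp only [pvRow]
  congr 2

-- ===== VERDICT (by name: the statement is the Claim_ definition above) =====
theorem generationEtatFinal_spec : Claim_equal_generationEtatFinal := by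
  intro n trou _
  unfold Spec_generationEtatFinal generationEtatFinal_alt
  by_cases hn : 1 ≤ n
  · rw [pvA_rows n trou hn, if_neg (by omega)]
    have hsplit : PySem.List.pyRange 0 n 1
        = PySem.List.pyRange 0 (n - 1) 1 ++ [n - 1] := by
      have := PySem.List.pyRange_one_succ_right (a := 0) (b := n - 1) (by omega)
      simpa using this
    rw [hsplit, List.map_append]
    congr 1
    · apply List.map_congr_left
      intro r hr
      have h2 : r < n - 1 := (PySem.List.mem_pyRange_one.mp hr).2
      have hne : r ≠ n - 1 := by omega
      simp [pvRow, hne]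
    · have he : (n - 1) * n + n - 1 = n * n - 1 := by ring
      simp only [List.map_cons, List.map_nil, pvRow, if_true, he]
  · have h0 : PySem.List.pyRange 0 n 1 = [] :=
      PySem.List.pyRange_one_eq_nil (by omega)
    rw [pvA_eq, if_pos (by omega)]
    simp [h0]
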